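-- pv_equiv track=rewrite | github.com/zooxop/lang-study | coding/python/programmers/level3/bad_user.py | check_id
-- ===== SOURCE A (Python) =====
-- def check_id(perm, banned_id):
--     count = 0
--
--     for idx, ban in enumerate(banned_id):
--         if len(ban) != len(perm[idx]):  # 길이가 다르다면 고려 대상이 아님.
--             continue
--
--         temp = list(perm[idx])
--         isPotential = True
--
--         for i in range(len(ban)):
--             if ban[i] == '*':  # 같은 index 값을 '*'로 만들면서 비교한다.
--                 temp[i] = '*'
--
--             if ban[i] != temp[i]:
--                 isPotential = False
--                 break
--
--         if isPotential:
--             count += 1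
--
--     return count
-- ===== SOURCE B (Python) =====
-- def check_id(perm, banned_id):
--     # Segment-based matching: split each ban on '*' into literal segments and
--     # verify each segment occurs at its fixed offset in perm[idx] (stars each
--     # consume exactly one position), instead of a per-character scan.
--     count = 0
--     for idx, ban in enumerate(banned_id):
--         cand = perm[idx]
--         if len(ban) != len(cand):
--             continue
--         pos = 0
--         ok = True
--         for seg in ban.split('*'):
--             if not cand.startswith(seg, pos):
--                 ok = False
--                 break
--             pos += len(seg) + 1
--         count += ok
--     return count
-- ===== Notes on version B (the rewrite author's own statement) =====
-- stated objective: alternative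
-- what changed: Replaces A's per-character scan over a mutated temp char list with a segment algorithm: each ban is split on '*' into literal segments and each segment is checked at its fixed offset in perm[idx] via startswith, stars each consuming one position.
import Mathlib
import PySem

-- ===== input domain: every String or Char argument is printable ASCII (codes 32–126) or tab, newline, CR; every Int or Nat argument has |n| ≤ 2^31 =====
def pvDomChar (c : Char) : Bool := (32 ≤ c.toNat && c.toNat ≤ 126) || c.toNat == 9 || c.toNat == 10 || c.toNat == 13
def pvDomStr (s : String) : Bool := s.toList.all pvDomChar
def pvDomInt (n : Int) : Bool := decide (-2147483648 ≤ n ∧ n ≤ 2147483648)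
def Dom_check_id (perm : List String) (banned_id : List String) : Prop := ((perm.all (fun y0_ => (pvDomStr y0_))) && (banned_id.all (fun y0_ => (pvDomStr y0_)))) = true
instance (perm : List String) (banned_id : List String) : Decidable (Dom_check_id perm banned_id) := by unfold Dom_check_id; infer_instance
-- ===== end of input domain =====

-- B replaces A's per-character scan with mutated temp list by a segment algorithm:
-- split the ban on '*' and check each literal segment at its fixed offset (alternative; same cost).

-- ===== PORT A =====
-- inner 'for i in range(len(ban))' loop: temp is the mutable list(perm[idx]);
-- under the length guard i is always in range, so getD's default is never used.
def aLoop (ban : List Char) (temp : List Char) (i : Nat) : Bool :=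
  if h : i < ban.length then
    let b := ban[i]
    let temp' := if b = '*' then temp.set i '*' else temp
    if b ≠ temp'.getD i ' ' then false
    else aLoop ban temp' (i + 1)
  else true
termination_by ban.length - i

def check_id (perm : List String) (banned_id : List String) : Int :=
  (PySem.List.enumerate banned_id 0).foldl (fun count p =>
    let ban := p.2.toList
    let cand := (PySem.List.pyGetD perm p.1 "").toList   -- perm[idx]; in range under Pre_
    if ban.length ≠ cand.length then count
    else if aLoop ban cand 0 then count + 1 else count) 0

-- ===== PORT B =====
-- ban.split('*'): Python str.split with the one-character separator '*', ported by
-- hand char for char (exact for this non-empty separator: ''.split('*') = ['']).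
def pySplitStar : List Char → List (List Char)
  | [] => [[]]
  | c :: r =>
    let rest := pySplitStar r
    if c = '*' then [] :: rest
    else (c :: rest.headD []) :: rest.tail

-- cand.startswith(seg, pos): exact for 0 ≤ pos (Python returns False when pos > len(cand))
def startswithAt (cand seg : List Char) (pos : Nat) : Bool :=
  if pos ≤ cand.length then seg.isPrefixOf (cand.drop pos) else false

-- B's inner 'for seg in ban.split('*')' loop with its break
def bSegLoop (cand : List Char) (pos : Nat) : List (List Char) → Bool
  | [] => true
  | seg :: rest =>
    if startswithAt cand seg pos then bSegLoop cand (pos + seg.length + 1) rest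
    else false

def check_id_alt (perm : List String) (banned_id : List String) : Int :=
  (PySem.List.enumerate banned_id 0).foldl (fun count p =>
    let ban := p.2.toList
    let cand := (PySem.List.pyGetD perm p.1 "").toList   -- perm[idx]; in range under Pre_
    if ban.length ≠ cand.length then count
    else if bSegLoop cand 0 (pySplitStar ban) then count + 1 else count) 0

-- ===== PRECONDITION & SPEC =====
-- Pre_ excludes inputs where Python A raises IndexError on perm[idx]
-- (banned_id longer than perm); B raises there too.
def Pre_check_id (perm : List String) (banned_id : List String) : Prop :=
  banned_id.length ≤ perm.length
instance (perm : List String) (banned_id : List String) : Decidable (Pre_check_id perm banned_id) := by unfold Pre_check_id; infer_instance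

def pvWitness_check_id : List String × List String := (["abc", "xyz"], ["a*c"])

def Spec_check_id (perm : List String) (banned_id : List String) (out : Int) : Prop := out = check_id_alt perm banned_id
instance (perm : List String) (banned_id : List String) (out : Int) : Decidable (Spec_check_id perm banned_id out) := by unfold Spec_check_id; infer_instance

-- ===== CLAIM (what is proved, stated in full; the proofs are below) =====
def Claim_equal_check_id : Prop := ∀ (perm : List String) (banned_id : List String), Dom_check_id perm banned_id → Pre_check_id perm banned_id → Spec_check_id perm banned_id (check_id perm banned_id)

-- ===== LEMMAS AND PROOFS =====

-- proof-side per-character characterisation of B's segment walk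
def matchFrom (cand : List Char) : List Char → Nat → Bool
  | [], _ => true
  | b :: bs, pos =>
    if b = '*' then matchFrom cand bs (pos + 1)
    else (cand[pos]? == some b) && matchFrom cand bs (pos + 1)

lemma pySplitStar_ne_nil (l : List Char) : pySplitStar l ≠ [] := by
  cases l with
  | nil => simp [pySplitStar]
  | cons c r => simp only [pySplitStar]; split_ifs <;> simp

lemma bSegLoop_cons_lit (cand : List Char) (c : Char) (h : List Char)
    (t : List (List Char)) (pos : Nat) (hp : pos < cand.length) :
    bSegLoop cand pos ((c :: h) :: t)
      = ((cand[pos]? == some c) && bSegLoop cand (pos + 1) (h :: t)) := by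
  have hdrop : cand.drop pos = cand[pos] :: cand.drop (pos + 1) :=
    List.drop_eq_getElem_cons hp
  have hget : cand[pos]? = some cand[pos] := List.getElem?_eq_getElem hp
  have hsw : startswithAt cand (c :: h) pos
      = ((c == cand[pos]) && startswithAt cand h (pos + 1)) := by
    unfold startswithAt
    rw [if_pos (by omega), if_pos (by omega), hdrop]
    simp [List.isPrefixOf]
  show (if startswithAt cand (c :: h) pos
        then bSegLoop cand (pos + (c :: h).length + 1) t else false) = _
  rw [hsw, hget]
  have hlen : pos + (c :: h).length + 1 = (pos + 1) + h.length + 1 := by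
    simp; omega
  rw [hlen]
  by_cases hc : c = cand[pos]
  · by_cases hsw' : startswithAt cand h (pos + 1) = true
    · simp [hc, hsw', bSegLoop]
    · simp only [Bool.not_eq_true] at hsw'
      simp [hc, hsw', bSegLoop]
  · have : ¬ cand[pos] = c := fun h' => hc h'.symm
    simp [hc, this, bSegLoop]

lemma seg_eq (ban : List Char) (pos : Nat) (cand : List Char)
    (hle : pos + ban.length ≤ cand.length) :
    bSegLoop cand pos (pySplitStar ban) = matchFrom cand ban pos := by
  induction ban generalizing pos with
  | nil =>
    simp only [pySplitStar, matchFrom, bSegLoop]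
    rw [if_pos (by unfold startswithAt; rw [if_pos (by omega)]; simp [List.isPrefixOf])]
  | cons b bs ih =>
    have hp : pos < cand.length := by simp at hle; omega
    by_cases hb : b = '*'
    · simp only [pySplitStar, hb, if_pos rfl, matchFrom]
      show bSegLoop cand pos ([] :: pySplitStar bs) = matchFrom cand bs (pos + 1)
      have : startswithAt cand [] pos = true := by
        unfold startswithAt; rw [if_pos (by omega)]; simp [List.isPrefixOf]
      simp only [bSegLoop, this, if_pos rfl, List.length_nil]
      have := ih (pos + 1) (by simp at hle ⊢; omega)
      simpa [Nat.add_comm, Nat.add_assoc, Nat.add_left_comm] using this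
    · obtain ⟨h, t, hsplit⟩ := List.exists_cons_of_ne_nil (pySplitStar_ne_nil bs)
      rw [show pySplitStar (b :: bs) = (b :: h) :: t by
        simp [pySplitStar, hb, hsplit]]
      rw [bSegLoop_cons_lit cand b h t pos hp, ← hsplit,
        ih (pos + 1) (by simp at hle ⊢; omega)]
      simp [matchFrom, hb]

lemma match_eq_zipall (ban : List Char) (pos : Nat) (cand : List Char)
    (hlen : pos + ban.length = cand.length) :
    matchFrom cand ban pos
      = ((ban.zip (cand.drop pos)).all fun bc => bc.1 == '*' || bc.1 == bc.2) := by
  induction ban generalizing pos with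
  | nil => simp [matchFrom]
  | cons b bs ih =>
    have hp : pos < cand.length := by simp at hlen; omega
    have hdrop : cand.drop pos = cand[pos] :: cand.drop (pos + 1) :=
      List.drop_eq_getElem_cons hp
    have hget : cand[pos]? = some cand[pos] := List.getElem?_eq_getElem hp
    rw [hdrop, List.zip_cons_cons, List.all_cons, ← ih (pos + 1) (by simp at hlen ⊢; omega)]
    by_cases hb : b = '*'
    · simp [matchFrom, hb]
    · simp only [matchFrom, if_neg hb, hget]
      by_cases he : b = cand[pos]
      · simp [he]
      · have hne : cand[pos] ≠ b := fun h' => he h'.symm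
        have h1 : (some cand[pos] == some b) = false := by simpa using hne
        have h2 : (b == cand[pos]) = false := by simpa using he
        have h3 : (b == '*') = false := by simpa using hb
        rw [h1, h2, h3]
        simp

-- previous characterisation of A's inner loop
lemma aLoop_eq (ban : List Char) (temp : List Char) (i : Nat)
    (h : ban.length = temp.length) :
    aLoop ban temp i
      = ((ban.drop i).zip (temp.drop i)).all (fun bc => bc.1 == '*' || bc.1 == bc.2) := by
  by_cases hi : i < ban.length
  · have hit : i < temp.length := h ▸ hi
    have hrhs : ((ban.drop i).zip (temp.drop i)).all (fun bc => bc.1 == '*' || bc.1 == bc.2)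
        = ((ban[i] == '*' || ban[i] == temp[i])
            && ((ban.drop (i+1)).zip (temp.drop (i+1))).all (fun bc => bc.1 == '*' || bc.1 == bc.2)) := by
      rw [List.drop_eq_getElem_cons hi, List.drop_eq_getElem_cons hit, List.zip_cons_cons,
        List.all_cons]
    rw [aLoop, dif_pos hi, hrhs]
    have hget : temp[i]?.getD ' ' = temp[i] := by rw [List.getElem?_eq_getElem hit]; rfl
    by_cases hb : ban[i] = '*'
    · have hlen : ban.length = (temp.set i '*').length := by simpa using h
      have hdrop : (temp.set i '*').drop (i + 1) = temp.drop (i + 1) := by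
        apply List.ext_getElem
        · simp
        · intro k hk1 hk2
          simp only [List.getElem_drop, List.getElem_set]
          rw [if_neg (by omega)]
      have hset : (temp.set i '*')[i]?.getD ' ' = '*' := by
        rw [List.getElem?_set_self (by simpa using hit)]
        rfl
      simp [hb, List.getD_eq_getElem?_getD, hset, hdrop,
        aLoop_eq ban (temp.set i '*') (i + 1) hlen]
    · simp only [hb, if_false, ite_false, List.getD_eq_getElem?_getD, hget, ne_eq]
      rw [aLoop_eq ban temp (i + 1) h]
      by_cases he : ban[i] = temp[i]
      · simp [he, hb]
      · simp [he, hb]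
  · rw [aLoop, dif_neg hi]
    simp [List.drop_eq_nil_of_le (by omega : ban.length ≤ i)]
termination_by ban.length - i

lemma body_eq (count : Int) (ban cand : List Char) :
    (if ban.length ≠ cand.length then count
     else if aLoop ban cand 0 then count + 1 else count)
      = (if ban.length ≠ cand.length then count
         else if bSegLoop cand 0 (pySplitStar ban) then count + 1 else count) := by
  by_cases h : ban.length = cand.length
  · have hz := aLoop_eq ban cand 0 h
    have hs := seg_eq ban 0 cand (by omega)
    have hm := match_eq_zipall ban 0 cand (by omega)
    simp only [h, ne_eq, not_true_eq_false, if_false, ite_false] at *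
    rw [hz, hs, hm]
    simp
  · simp [h]

lemma folds_eq (perm banned_id : List String) :
    check_id perm banned_id = check_id_alt perm banned_id := by
  unfold check_id check_id_alt
  exact congrFun (congrFun (congrArg List.foldl (funext fun (count : Int) => funext fun (p : Int × String) =>
    body_eq count p.2.toList ((PySem.List.pyGetD perm p.1 "").toList))) 0) _

-- ===== VERDICT (by name: the statement is the Claim_ definition above) =====
theorem check_id_spec : Claim_equal_check_id := by
  intro perm banned_id _ _
  exact folds_eq perm banned_id
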